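-- pv_equiv track=rewrite | github.com/AlejandroFdezSuarez97/TFG_Informatica | interfaz_grafica/interfaz_poli_reducciones/interfaz_hamcycle_uhamcycle/etapa_1.py | crear_diccionario_letras
-- ===== SOURCE A (Python) =====
-- def crear_diccionario_letras(numNodos):
--     diccionario = {}
--     letra = 'a'  # Iniciar con la letra 'a' en minúscula
--     count = 1
--
--     while count <= numNodos:
--         diccionario[count] = letra
--
--         # Incrementar la letra
--         if letra[-1] == 'z':
--             letra += 'a'
--         else:
--             letra = letra[:-1] + chr(ord(letra[-1]) + 1)
--
--         count += 1
--
--     return diccionario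
-- ===== SOURCE B (Python) =====
-- def crear_diccionario_letras(numNodos):
--     # Closed form: entry i is 'z' * ((i-1)//26) followed by chr(97 + (i-1)%26).
--     return {i: 'z' * ((i - 1) // 26) + chr(97 + (i - 1) % 26)
--             for i in range(1, numNodos + 1)}
-- ===== Notes on version B (the rewrite author's own statement) =====
-- stated objective: simpler
-- what changed: Replaced the stateful while-loop that increments a growing letter string step by step with a closed-form dict comprehension computing each label directly from divmod(i-1, 26).
import Mathlib
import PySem

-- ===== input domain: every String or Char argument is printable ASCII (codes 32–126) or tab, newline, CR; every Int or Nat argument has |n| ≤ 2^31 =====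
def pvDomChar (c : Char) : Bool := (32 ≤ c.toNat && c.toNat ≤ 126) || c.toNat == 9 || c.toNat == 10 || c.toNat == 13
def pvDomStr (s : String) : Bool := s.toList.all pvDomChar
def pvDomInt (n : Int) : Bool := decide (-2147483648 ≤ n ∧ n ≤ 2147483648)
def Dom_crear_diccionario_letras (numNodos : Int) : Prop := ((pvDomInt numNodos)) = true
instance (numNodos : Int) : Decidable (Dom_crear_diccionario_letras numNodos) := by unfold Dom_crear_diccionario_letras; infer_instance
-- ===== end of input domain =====

-- B replaces A's stateful letter-incrementing while-loop with a closed-form comprehension from divmod(i-1,26).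

-- ===== PORT A =====
-- while-loop of A: state (diccionario, letra, count); letra kept as List Char
-- (letra[-1] is its getLast, letra[:-1] its dropLast; letra is never empty in A).
def pyA_loop (numNodos : Int) (d : PySem.Dict Int String) (letra : List Char) (count : Int) :
    PySem.Dict Int String :=
  if h : count ≤ numNodos then
    let d' := d.insert count (String.ofList letra)
    let letra' :=
      if letra.getLastD 'a' == 'z' then letra ++ ['a']
      else letra.dropLast ++ [Char.ofNat ((letra.getLastD 'a').toNat + 1)]
    pyA_loop numNodos d' letra' (count + 1)
  else d
termination_by (numNodos + 1 - count).toNat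
decreasing_by omega

def crear_diccionario_letras (numNodos : Int) : List (Int × String) :=
  (pyA_loop numNodos PySem.Dict.empty ['a'] 1).items

-- ===== PORT B =====
-- closed form: entry i is 'z' * ((i-1)//26) followed by chr(97 + (i-1)%26)
def crear_diccionario_letras_alt (numNodos : Int) : List (Int × String) :=
  (PySem.List.pyRange 1 (numNodos + 1) 1).map (fun i =>
    (i, String.ofList (List.replicate (PySem.Int.floordiv (i - 1) 26).toNat 'z'
          ++ [Char.ofNat (97 + (PySem.Int.mod (i - 1) 26).toNat)])))

-- ===== PRECONDITION & SPEC =====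
def Spec_crear_diccionario_letras (numNodos : Int) (out : List (Int × String)) : Prop := out = crear_diccionario_letras_alt numNodos
instance (numNodos : Int) (out : List (Int × String)) : Decidable (Spec_crear_diccionario_letras numNodos out) := by unfold Spec_crear_diccionario_letras; infer_instance

-- ===== CLAIM (what is proved, stated in full; the proofs are below) =====
def Claim_equal_crear_diccionario_letras : Prop := ∀ (numNodos : Int), Dom_crear_diccionario_letras numNodos → Spec_crear_diccionario_letras numNodos (crear_diccionario_letras numNodos)

-- ===== LEMMAS AND PROOFS =====

-- the letter string A holds when count-1 = m (m ≥ 0)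
def repN (m : Nat) : List Char :=
  List.replicate (m / 26) 'z' ++ [Char.ofNat (97 + m % 26)]

-- one increment step of A turns repN m into repN (m+1)
lemma repN_step (m : Nat) :
    (if (repN m).getLastD 'a' == 'z' then repN m ++ ['a']
     else (repN m).dropLast ++ [Char.ofNat (((repN m).getLastD 'a').toNat + 1)])
    = repN (m + 1) := by
  have hr : m % 26 < 26 := Nat.mod_lt _ (by omega)
  by_cases h25 : m % 26 = 25
  · have hdiv : (m + 1) / 26 = m / 26 + 1 := by omega
    have hmod : (m + 1) % 26 = 0 := by omega
    simp only [repN, List.getLastD_concat, h25, hdiv, hmod]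
    norm_num
    rw [List.replicate_succ']
    simp
  · have hdiv : (m + 1) / 26 = m / 26 := by omega
    have hmod : (m + 1) % 26 = m % 26 + 1 := by omega
    have hlt : m % 26 ≤ 24 := by omega
    simp only [repN, List.getLastD_concat, List.dropLast_concat, hdiv, hmod]
    interval_cases h : m % 26 <;> simp_all

-- for 1 ≤ i the closed-form label of B equals A's letter string repN (i-1)
lemma repN_closed (i : Int) (h : 1 ≤ i) :
    String.ofList (repN (i - 1).toNat)
      = String.ofList (List.replicate (PySem.Int.floordiv (i - 1) 26).toNat 'z'
          ++ [Char.ofNat (97 + (PySem.Int.mod (i - 1) 26).toNat)]) := by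
  have h1 : (PySem.Int.floordiv (i - 1) 26).toNat = (i - 1).toNat / 26 := by
    rw [PySem.Int.floordiv_eq_ediv_of_pos (by norm_num)]; omega
  have h2 : (PySem.Int.mod (i - 1) 26).toNat = (i - 1).toNat % 26 := by
    rw [PySem.Int.mod_eq_emod_of_pos (by norm_num)]; omega
  rw [h1, h2]; rfl

-- loop invariant: starting at count with letra = repN (count-1) and all keys of d below count,
-- the loop appends exactly B's pairs for count..numNodos
lemma pyA_loop_items (n : Nat) :
    ∀ (numNodos count : Int) (d : PySem.Dict Int String),
      (numNodos + 1 - count).toNat = n → 1 ≤ count →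
      (∀ k ∈ d.keys, k < count) →
      (pyA_loop numNodos d (repN (count - 1).toNat) count).items
        = d.items ++ (PySem.List.pyRange count (numNodos + 1) 1).map (fun i =>
            (i, String.ofList (List.replicate (PySem.Int.floordiv (i - 1) 26).toNat 'z'
                  ++ [Char.ofNat (97 + (PySem.Int.mod (i - 1) 26).toNat)]))) := by
  induction n with
  | zero =>
    intro numNodos count d hn hc hkeys
    have hle : numNodos < count := by omega
    rw [pyA_loop.eq_def, dif_neg (show ¬ count ≤ numNodos by omega)]
    rw [PySem.List.pyRange_one_eq_nil (by omega)]
    simp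
  | succ n ih =>
    intro numNodos count d hn hc hkeys
    have hlt : count ≤ numNodos := by omega
    rw [pyA_loop.eq_def, dif_pos hlt]
    simp only
    rw [repN_step]
    have hsucc : ((count + 1) - 1).toNat = (count - 1).toNat + 1 := by omega
    rw [← hsucc]
    have hfresh : d.contains count = false := by
      rw [PySem.Dict.contains_eq_decide_mem_keys]
      simp only [decide_eq_false_iff_not]
      intro hmem
      exact absurd (hkeys _ hmem) (by omega)
    rw [ih numNodos (count + 1) _ (by omega) (by omega)
        (by
          intro k hk
          rw [PySem.Dict.mem_keys_insert] at hk
          rcases hk with h | h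
          · omega
          · have := hkeys _ h; omega)]
    rw [PySem.Dict.items_insert_of_not_contains _ _ hfresh]
    rw [PySem.List.pyRange_one_cons (show count < numNodos + 1 by omega)]
    rw [repN_closed count hc]
    simp

-- ===== VERDICT (by name: the statement is the Claim_ definition above) =====
theorem crear_diccionario_letras_spec : Claim_equal_crear_diccionario_letras := by
  intro numNodos _
  unfold Spec_crear_diccionario_letras crear_diccionario_letras crear_diccionario_letras_alt
  have h0 : repN ((1:Int) - 1).toNat = ['a'] := by decide
  rw [← h0]
  rw [pyA_loop_items (numNodos + 1 - 1).toNat numNodos 1 PySem.Dict.empty rfl (by omega)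
      (by intro k hk; simp [PySem.Dict.keys_empty] at hk)]
  simp [PySem.Dict.empty]
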